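-- pv_equiv track=rewrite | github.com/kkr010128/codebert | problem101/problem101_8.py | solve
-- ===== SOURCE A (Python) =====
-- def solve(a, b, c, k):
--     for i_a in range(k+1):
--         for i_b in range(k+1):
--             for i_c in range(k+1):
--                 if i_a + i_b + i_c > k:
--                     break
--                 x = a * (2**i_a)
--                 y = b * (2**i_b)
--                 z = c * (2**i_c)
--                 if x < y < z:
--                     return "Yes"
--     return "No"
-- ===== SOURCE B (Python) =====
-- def solve(a, b, c, k):
--     for i_b in range(k + 1):
--         y = b * 2 ** i_b
--         for i_a in range(k + 1 - i_b):
--             if a * 2 ** i_a < y: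
--                 i_c = 0
--                 if c > 0:
--                     while c * 2 ** i_c <= y:
--                         i_c += 1
--                 if i_c <= k - i_a - i_b and y < c * 2 ** i_c:
--                     return "Yes"
--     return "No"
-- ===== Notes on version B (the rewrite author's own statement) =====
-- stated objective: alternative
-- what changed: B drops A's innermost i_c loop: for each (i_b, i_a) pair it computes the minimal i_c with y < c*2**i_c directly (0 when c <= 0, else a short doubling loop) and compares it to the remaining budget k-i_a-i_b, exploiting that c*2**i_c is monotone in i_c; it trades the third nested scan for big-integer comparisons of the same overall cost on the worst inputs.
import Mathlib
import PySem

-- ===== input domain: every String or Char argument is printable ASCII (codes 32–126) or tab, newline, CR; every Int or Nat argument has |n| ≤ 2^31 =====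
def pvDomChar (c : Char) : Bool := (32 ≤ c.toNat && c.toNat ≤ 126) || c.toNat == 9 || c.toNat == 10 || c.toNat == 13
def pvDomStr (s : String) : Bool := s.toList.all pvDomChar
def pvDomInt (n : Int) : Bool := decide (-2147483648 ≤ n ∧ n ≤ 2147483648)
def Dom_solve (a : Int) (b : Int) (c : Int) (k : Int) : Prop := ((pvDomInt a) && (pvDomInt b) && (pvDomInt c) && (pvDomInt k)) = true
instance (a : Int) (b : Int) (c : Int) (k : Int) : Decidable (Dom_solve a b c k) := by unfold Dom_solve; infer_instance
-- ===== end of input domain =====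

-- B removes A's innermost i_c loop: it computes the minimal doubling count i_c with
-- y < c*2^i_c directly and compares it to the remaining budget (monotonicity in i_c).

-- ===== PORT A =====
-- Each Python `for i in range(n)` becomes counting recursion: current index plus the
-- number of remaining iterations (fuel), exactly the 0..n-1 traversal with early exit;
-- range(k+1) makes fuel (k+1).toNat (empty when k < 0, as in Python).
-- The `break` on i_a+i_b+i_c > k stops the innermost recursion, as in Python.
def solveLoopC (a : Int) (b : Int) (c : Int) (k : Int) (ia : Nat) (ib : Nat) : Nat → Nat → Bool
  | _, 0 => false
  | ic, fuel+1 =>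
    if (ia : Int) + ib + ic > k then false
    else if a * (2:Int)^ia < b * (2:Int)^ib ∧ b * (2:Int)^ib < c * (2:Int)^ic then true
    else solveLoopC a b c k ia ib (ic+1) fuel

def solveLoopB (a : Int) (b : Int) (c : Int) (k : Int) (ia : Nat) : Nat → Nat → Bool
  | _, 0 => false
  | ib, fuel+1 =>
    if solveLoopC a b c k ia ib 0 (k+1).toNat then true
    else solveLoopB a b c k ia (ib+1) fuel

def solveLoopA (a : Int) (b : Int) (c : Int) (k : Int) : Nat → Nat → Bool
  | _, 0 => false
  | ia, fuel+1 =>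
    if solveLoopB a b c k ia 0 (k+1).toNat then true
    else solveLoopA a b c k (ia+1) fuel

def solve (a : Int) (b : Int) (c : Int) (k : Int) : String :=
  if solveLoopA a b c k 0 (k+1).toNat then "Yes" else "No"

-- ===== PORT B =====
-- B's two loops, same counting-recursion rendering of `for … in range(…)`.
-- The `while c * 2**i_c <= y: i_c += 1` loop becomes `minShift` with fuel
-- y.toNat + 1, which provably suffices (for 0 < c the loop exits once 2^i_c > y).
def minShift (c : Int) (y : Int) : Nat → Nat → Nat
  | ic, 0 => ic
  | ic, fuel+1 => if c * (2:Int)^ic ≤ y then minShift c y (ic+1) fuel else ic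

-- i_c as B computes it for the current y = b * 2**i_b: 0, then the while loop if c > 0.
def icChoice (b : Int) (c : Int) (ib : Nat) : Nat :=
  if 0 < c then minShift c (b * (2:Int)^ib) 0 ((b * (2:Int)^ib).toNat + 1) else 0

def altInner (a : Int) (b : Int) (c : Int) (k : Int) (ib : Nat) : Nat → Nat → Bool
  | _, 0 => false
  | ia, fuel+1 =>
    if a * (2:Int)^ia < b * (2:Int)^ib then
      if (icChoice b c ib : Int) ≤ k - ia - ib ∧
          b * (2:Int)^ib < c * (2:Int)^(icChoice b c ib) then true
      else altInner a b c k ib (ia+1) fuel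
    else altInner a b c k ib (ia+1) fuel

def altOuter (a : Int) (b : Int) (c : Int) (k : Int) : Nat → Nat → Bool
  | _, 0 => false
  | ib, fuel+1 =>
    if altInner a b c k ib 0 (k + 1 - ib).toNat then true
    else altOuter a b c k (ib+1) fuel

def solve_alt (a : Int) (b : Int) (c : Int) (k : Int) : String :=
  if altOuter a b c k 0 (k+1).toNat then "Yes" else "No"

-- ===== PRECONDITION & SPEC =====
def Spec_solve (a : Int) (b : Int) (c : Int) (k : Int) (out : String) : Prop := out = solve_alt a b c k
instance (a : Int) (b : Int) (c : Int) (k : Int) (out : String) : Decidable (Spec_solve a b c k out) := by unfold Spec_solve; infer_instance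

-- ===== CLAIM (what is proved, stated in full; the proofs are below) =====
def Claim_equal_solve : Prop := ∀ (a : Int) (b : Int) (c : Int) (k : Int), Dom_solve a b c k → Spec_solve a b c k (solve a b c k)

-- ===== LEMMAS AND PROOFS =====

-- The common existential both searches decide.
def Ex (a : Int) (b : Int) (c : Int) (k : Int) : Prop :=
  ∃ ia ib ic : Nat, (ia : Int) + ib + ic ≤ k ∧
    a * (2:Int)^ia < b * (2:Int)^ib ∧ b * (2:Int)^ib < c * (2:Int)^ic

lemma solveLoopC_iff (a b c k : Int) (ia ib : Nat) (fuel ic0 : Nat) :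
    solveLoopC a b c k ia ib ic0 fuel = true ↔
      ∃ ic : Nat, ic0 ≤ ic ∧ ic < ic0 + fuel ∧ (ia : Int) + ib + ic ≤ k ∧
        a * (2:Int)^ia < b * (2:Int)^ib ∧ b * (2:Int)^ib < c * (2:Int)^ic := by
  induction fuel generalizing ic0 with
  | zero => simp [solveLoopC]; omega
  | succ fuel ih =>
    by_cases hbr : (ia : Int) + ib + ic0 > k
    · simp only [solveLoopC]
      rw [if_pos hbr]
      constructor
      · intro hf; exact absurd hf (by simp)
      · rintro ⟨ic, hge, -, hsum, -⟩
        have : (ic0 : Int) ≤ ic := by exact_mod_cast hge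
        omega
    · by_cases ht : a * (2:Int)^ia < b * (2:Int)^ib ∧ b * (2:Int)^ib < c * (2:Int)^ic0
      · simp only [solveLoopC]
        rw [if_neg hbr, if_pos ht]
        exact ⟨fun _ => ⟨ic0, le_refl _, by omega, by omega, ht⟩, fun _ => rfl⟩
      · simp only [solveLoopC]
        rw [if_neg hbr, if_neg ht, ih]
        constructor
        · rintro ⟨ic, h1, h2, hp⟩; exact ⟨ic, by omega, by omega, hp⟩
        · rintro ⟨ic, h1, h2, hp⟩
          rcases Nat.eq_or_lt_of_le h1 with rfl | h1'
          · exact absurd hp.2 ht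
          · exact ⟨ic, h1', by omega, hp⟩

lemma solveLoopB_iff (a b c k : Int) (ia : Nat) (fuel ib0 : Nat) :
    solveLoopB a b c k ia ib0 fuel = true ↔
      ∃ ib : Nat, ib0 ≤ ib ∧ ib < ib0 + fuel ∧
        solveLoopC a b c k ia ib 0 (k+1).toNat = true := by
  induction fuel generalizing ib0 with
  | zero => simp [solveLoopB]; omega
  | succ fuel ih =>
    by_cases hc : solveLoopC a b c k ia ib0 0 (k+1).toNat = true
    · simp only [solveLoopB]
      rw [if_pos hc]
      exact ⟨fun _ => ⟨ib0, le_refl _, by omega, hc⟩, fun _ => rfl⟩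
    · simp only [solveLoopB]
      rw [if_neg hc, ih]
      constructor
      · rintro ⟨ib, h1, h2, hp⟩; exact ⟨ib, by omega, by omega, hp⟩
      · rintro ⟨ib, h1, h2, hp⟩
        rcases Nat.eq_or_lt_of_le h1 with rfl | h1'
        · exact absurd hp hc
        · exact ⟨ib, h1', by omega, hp⟩

lemma solveLoopA_iff (a b c k : Int) (fuel ia0 : Nat) :
    solveLoopA a b c k ia0 fuel = true ↔
      ∃ ia : Nat, ia0 ≤ ia ∧ ia < ia0 + fuel ∧
        solveLoopB a b c k ia 0 (k+1).toNat = true := by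
  induction fuel generalizing ia0 with
  | zero => simp [solveLoopA]; omega
  | succ fuel ih =>
    by_cases hc : solveLoopB a b c k ia0 0 (k+1).toNat = true
    · simp only [solveLoopA]
      rw [if_pos hc]
      exact ⟨fun _ => ⟨ia0, le_refl _, by omega, hc⟩, fun _ => rfl⟩
    · simp only [solveLoopA]
      rw [if_neg hc, ih]
      constructor
      · rintro ⟨ia, h1, h2, hp⟩; exact ⟨ia, by omega, by omega, hp⟩
      · rintro ⟨ia, h1, h2, hp⟩
        rcases Nat.eq_or_lt_of_le h1 with rfl | h1'
        · exact absurd hp hc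
        · exact ⟨ia, h1', by omega, hp⟩

lemma solveA_yes (a b c k : Int) :
    solveLoopA a b c k 0 (k+1).toNat = true ↔ Ex a b c k := by
  rw [solveLoopA_iff]
  constructor
  · rintro ⟨ia, -, -, hB⟩
    rcases (solveLoopB_iff a b c k ia _ _).mp hB with ⟨ib, -, -, hC⟩
    rcases (solveLoopC_iff a b c k ia ib _ _).mp hC with ⟨ic, -, -, hsum, ht⟩
    exact ⟨ia, ib, ic, hsum, ht⟩
  · rintro ⟨ia, ib, ic, hsum, ht⟩
    refine ⟨ia, by omega, by omega, (solveLoopB_iff a b c k ia _ _).mpr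
      ⟨ib, by omega, by omega, (solveLoopC_iff a b c k ia ib _ _).mpr
        ⟨ic, by omega, by omega, hsum, ht⟩⟩⟩

lemma minShift_inv (c y : Int) (fuel : Nat) : ∀ ic : Nat,
    (∀ j < ic, c * (2:Int)^j ≤ y) →
      (∀ j < minShift c y ic fuel, c * (2:Int)^j ≤ y) ∧
        (y < c * (2:Int)^(minShift c y ic fuel) ∨ minShift c y ic fuel = ic + fuel) := by
  induction fuel with
  | zero => intro ic h; exact ⟨h, Or.inr rfl⟩
  | succ fuel ih =>
    intro ic h
    by_cases hle : c * (2:Int)^ic ≤ y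
    · simp only [minShift]
      rw [if_pos hle]
      have h' : ∀ j < ic + 1, c * (2:Int)^j ≤ y := by
        intro j hj
        rcases Nat.lt_succ_iff_lt_or_eq.mp hj with hj' | rfl
        · exact h j hj'
        · exact hle
      rcases ih (ic+1) h' with ⟨h1, h2⟩
      exact ⟨h1, by omega⟩
    · simp only [minShift]
      rw [if_neg hle]
      exact ⟨h, Or.inl (by omega)⟩

lemma minShift_spec (c y : Int) (hc : 0 < c) :
    y < c * (2:Int)^(minShift c y 0 (y.toNat + 1)) ∧
      ∀ j < minShift c y 0 (y.toNat + 1), c * (2:Int)^j ≤ y := by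
  rcases minShift_inv c y (y.toNat + 1) 0 (by omega) with ⟨hall, hlt | hex⟩
  · exact ⟨hlt, hall⟩
  · exfalso
    have h1 : c * (2:Int)^(y.toNat) ≤ y := hall y.toNat (by omega)
    have h2 : (2:Int)^(y.toNat) ≤ c * (2:Int)^(y.toNat) := by
      have : (0:Int) < (2:Int)^(y.toNat) := by positivity
      nlinarith
    have h3 : (y.toNat : Int) < (2:Int)^(y.toNat) := by
      have := Nat.lt_two_pow_self (n := y.toNat)
      exact_mod_cast this
    omega

-- B's test at (ia, ib) accepts iff some i_c within the remaining budget works.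
lemma icChoice_iff (b c k : Int) (ia ib : Nat) :
    ((icChoice b c ib : Int) ≤ k - ia - ib ∧
        b * (2:Int)^ib < c * (2:Int)^(icChoice b c ib)) ↔
      ∃ ic : Nat, (ia : Int) + ib + ic ≤ k ∧ b * (2:Int)^ib < c * (2:Int)^ic := by
  constructor
  · rintro ⟨hbud, hlt⟩
    exact ⟨icChoice b c ib, by omega, hlt⟩
  · rintro ⟨ic, hsum, hlt⟩
    by_cases hc : 0 < c
    · have hchoice : icChoice b c ib =
          minShift c (b * (2:Int)^ib) 0 ((b * (2:Int)^ib).toNat + 1) := if_pos hc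
      rcases minShift_spec c (b * (2:Int)^ib) hc with ⟨hgt, hmin⟩
      rw [hchoice]
      have hr : minShift c (b * (2:Int)^ib) 0 ((b * (2:Int)^ib).toNat + 1) ≤ ic := by
        by_contra hgtc
        exact absurd hlt (not_lt.mpr (hmin ic (by omega)))
      exact ⟨by omega, hgt⟩
    · have hchoice : icChoice b c ib = 0 := if_neg hc
      rw [hchoice]
      have h1 : (1:Int) ≤ (2:Int)^ic := one_le_pow₀ (by norm_num)
      have : c * (2:Int)^ic ≤ c * 1 := mul_le_mul_of_nonpos_left h1 (by omega)
      exact ⟨by omega, by simpa using lt_of_lt_of_le hlt this⟩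

lemma altInner_iff (a b c k : Int) (ib : Nat) (fuel ia0 : Nat) :
    altInner a b c k ib ia0 fuel = true ↔
      ∃ ia : Nat, ia0 ≤ ia ∧ ia < ia0 + fuel ∧
        a * (2:Int)^ia < b * (2:Int)^ib ∧
        ((icChoice b c ib : Int) ≤ k - ia - ib ∧
          b * (2:Int)^ib < c * (2:Int)^(icChoice b c ib)) := by
  induction fuel generalizing ia0 with
  | zero => simp [altInner]; omega
  | succ fuel ih =>
    by_cases hxy : a * (2:Int)^ia0 < b * (2:Int)^ib
    · by_cases htc : (icChoice b c ib : Int) ≤ k - ia0 - ib ∧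
          b * (2:Int)^ib < c * (2:Int)^(icChoice b c ib)
      · simp only [altInner]
        rw [if_pos hxy, if_pos htc]
        exact ⟨fun _ => ⟨ia0, le_refl _, by omega, hxy, htc⟩, fun _ => rfl⟩
      · simp only [altInner]
        rw [if_pos hxy, if_neg htc, ih]
        constructor
        · rintro ⟨ia, h1, h2, hp⟩; exact ⟨ia, by omega, by omega, hp⟩
        · rintro ⟨ia, h1, h2, hp⟩
          rcases Nat.eq_or_lt_of_le h1 with rfl | h1'
          · exact absurd hp.2 htc
          · exact ⟨ia, h1', by omega, hp⟩
    · simp only [altInner]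
      rw [if_neg hxy, ih]
      constructor
      · rintro ⟨ia, h1, h2, hp⟩; exact ⟨ia, by omega, by omega, hp⟩
      · rintro ⟨ia, h1, h2, hp⟩
        rcases Nat.eq_or_lt_of_le h1 with rfl | h1'
        · exact absurd hp.1 hxy
        · exact ⟨ia, h1', by omega, hp⟩

lemma altOuter_iff (a b c k : Int) (fuel ib0 : Nat) :
    altOuter a b c k ib0 fuel = true ↔
      ∃ ib : Nat, ib0 ≤ ib ∧ ib < ib0 + fuel ∧
        altInner a b c k ib 0 (k + 1 - ib).toNat = true := by
  induction fuel generalizing ib0 with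
  | zero => simp [altOuter]; omega
  | succ fuel ih =>
    by_cases hc : altInner a b c k ib0 0 (k + 1 - ib0).toNat = true
    · simp only [altOuter]
      rw [if_pos hc]
      exact ⟨fun _ => ⟨ib0, le_refl _, by omega, hc⟩, fun _ => rfl⟩
    · simp only [altOuter]
      rw [if_neg hc, ih]
      constructor
      · rintro ⟨ib, h1, h2, hp⟩; exact ⟨ib, by omega, by omega, hp⟩
      · rintro ⟨ib, h1, h2, hp⟩
        rcases Nat.eq_or_lt_of_le h1 with rfl | h1'
        · exact absurd hp hc
        · exact ⟨ib, h1', by omega, hp⟩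

lemma altB_yes (a b c k : Int) :
    altOuter a b c k 0 (k+1).toNat = true ↔ Ex a b c k := by
  rw [altOuter_iff]
  constructor
  · rintro ⟨ib, -, -, hI⟩
    rcases (altInner_iff a b c k ib _ _).mp hI with ⟨ia, -, -, hxy, htc⟩
    rcases (icChoice_iff b c k ia ib).mp htc with ⟨ic, hsum, hyz⟩
    exact ⟨ia, ib, ic, hsum, hxy, hyz⟩
  · rintro ⟨ia, ib, ic, hsum, hxy, hyz⟩
    refine ⟨ib, by omega, by omega, (altInner_iff a b c k ib _ _).mpr
      ⟨ia, by omega, by omega, hxy, ?_⟩⟩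
    exact (icChoice_iff b c k ia ib).mpr ⟨ic, hsum, hyz⟩

-- ===== VERDICT (by name: the statement is the Claim_ definition above) =====
theorem solve_spec : Claim_equal_solve := by
  intro a b c k _
  unfold Spec_solve solve solve_alt
  by_cases hE : Ex a b c k
  · rw [if_pos ((solveA_yes a b c k).mpr hE), if_pos ((altB_yes a b c k).mpr hE)]
  · rw [if_neg (fun h => hE ((solveA_yes a b c k).mp h)),
        if_neg (fun h => hE ((altB_yes a b c k).mp h))]
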